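-- pv_equiv track=rewrite | github.com/fzinnah17/codepath-weekly-assignments-TIP-102-4b | unit1-session1-2.py | tiggerfy
-- ===== SOURCE A (Python) =====
-- def tiggerfy(word):
--     i = 0
--     res = ''
--     while i < len(word):
--         w = word[i:].lower()
--         if w.startswith("gg"):
--             i += 2
--         elif w.startswith("er"):
--             i += 2
--         elif word[i].lower() in ("t", "i"):
--             i += 1
--         else:
--             res += word[i]
--             i += 1
--     return res
-- ===== SOURCE B (Python) =====
-- def tiggerfy(word):
--     out = []
--     pend = None  # previous character, not yet decided
--     for c in word:
--         if pend is not None and (pend + c).lower() in ("gg", "er"):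
--             pend = None
--         elif pend is None or pend.lower() in ("t", "i"):
--             pend = c
--         else:
--             out.append(pend)
--             pend = c
--     if pend is not None and pend.lower() not in ("t", "i"):
--         out.append(pend)
--     return "".join(out)
-- ===== Notes on version B (the rewrite author's own statement) =====
-- stated objective: faster
-- what changed: The index-based while loop that re-slices and lowercases the whole remaining suffix and tests startswith at every position is replaced by a single forward pass holding one undecided lookbehind character (a small state machine): a gg/er pair cancels the pending char, a pending t/i is dropped, anything else is flushed to an output list joined once at the end; no index arithmetic, no slicing, no startswith.
import Mathlib
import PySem

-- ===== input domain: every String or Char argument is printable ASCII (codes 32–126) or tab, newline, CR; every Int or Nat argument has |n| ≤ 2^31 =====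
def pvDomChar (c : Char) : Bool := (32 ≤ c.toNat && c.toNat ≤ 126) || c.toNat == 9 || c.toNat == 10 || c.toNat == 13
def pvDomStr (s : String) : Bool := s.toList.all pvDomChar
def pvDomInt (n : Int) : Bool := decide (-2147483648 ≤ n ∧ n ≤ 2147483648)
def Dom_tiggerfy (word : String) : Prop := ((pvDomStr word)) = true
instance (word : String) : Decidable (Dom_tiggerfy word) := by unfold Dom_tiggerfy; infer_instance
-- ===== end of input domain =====

-- B replaces A's index-and-accumulator while loop (suffix slice + lower + startswith at each
-- position) by a single forward pass with one undecided lookbehind character; same return value.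

-- ===== PORT A =====
-- while loop: i is the scan index, res the accumulator; word[i:] with i : Nat is cs.drop i,
-- .lower() is PySem.Chars.lower, startswith is PySem.Chars.startswith, word[i] is cs[i] (i < len).
def tigLoop (cs : List Char) (i : Nat) (res : List Char) : List Char :=
  if h : i < cs.length then
    let w := PySem.Chars.lower (cs.drop i)
    if PySem.Chars.startswith w ['g','g'] then tigLoop cs (i+2) res
    else if PySem.Chars.startswith w ['e','r'] then tigLoop cs (i+2) res
    else if PySem.Chars.lowerChar cs[i] = 't' ∨ PySem.Chars.lowerChar cs[i] = 'i' then
      tigLoop cs (i+1) res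
    else tigLoop cs (i+1) (res ++ [cs[i]])
  else res
termination_by cs.length - i

def tiggerfy (word : String) : String := String.ofList (tigLoop word.toList 0 [])

-- ===== PORT B =====
-- one step of the for loop: state = (out, pend); the branch order mirrors Source B
def tigStep (st : List Char × Option Char) (c : Char) : List Char × Option Char :=
  match st with
  | (out, some p) =>
    if (PySem.Chars.lowerChar p = 'g' ∧ PySem.Chars.lowerChar c = 'g') ∨
       (PySem.Chars.lowerChar p = 'e' ∧ PySem.Chars.lowerChar c = 'r') then (out, none)
    else if PySem.Chars.lowerChar p = 't' ∨ PySem.Chars.lowerChar p = 'i' then (out, some c)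
    else (out ++ [p], some c)
  | (out, none) => (out, some c)

-- the final flush after the loop (Source B's trailing 'if pend is not None …')
def tigFinish (st : List Char × Option Char) : List Char :=
  match st with
  | (out, some p) =>
    if PySem.Chars.lowerChar p = 't' ∨ PySem.Chars.lowerChar p = 'i' then out else out ++ [p]
  | (out, none) => out

-- ''.join(out) over single characters is String.ofList of the char list
def tiggerfy_alt (word : String) : String :=
  String.ofList (tigFinish (word.toList.foldl tigStep ([], none)))

-- ===== PRECONDITION & SPEC =====
def Spec_tiggerfy (word : String) (out : String) : Prop := out = tiggerfy_alt word
instance (word : String) (out : String) : Decidable (Spec_tiggerfy word out) := by unfold Spec_tiggerfy; infer_instance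

-- ===== CLAIM (what is proved, stated in full; the proofs are below) =====
def Claim_equal_tiggerfy : Prop := ∀ (word : String), Dom_tiggerfy word → Spec_tiggerfy word (tiggerfy word)

-- ===== LEMMAS AND PROOFS =====

-- proof-only characterisation of the removal: structural recursion both ports are related to
def tigSpec : List Char → List Char
  | [] => []
  | c :: rest =>
    let a := PySem.Chars.lowerChar c
    match rest with
    | d :: rest' =>
      if (a = 'g' ∧ PySem.Chars.lowerChar d = 'g') ∨ (a = 'e' ∧ PySem.Chars.lowerChar d = 'r')
      then tigSpec rest'
      else if a = 't' ∨ a = 'i' then tigSpec (d :: rest')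
      else c :: tigSpec (d :: rest')
    | [] => if a = 't' ∨ a = 'i' then [] else [c]

theorem sw2 (x y c d : Char) (rest : List Char) :
    PySem.Chars.startswith (x :: y :: rest) [c, d] = (decide (x = c) && decide (y = d)) := by
  simp [PySem.Chars.startswith, List.isPrefixOf, beq_eq_decide, eq_comm]

theorem sw1 (x c d : Char) : PySem.Chars.startswith [x] [c, d] = false := by
  simp [PySem.Chars.startswith, List.isPrefixOf]

theorem tigLoop_eq (n : Nat) : ∀ (cs : List Char) (i : Nat) (res : List Char),
    cs.length - i = n → tigLoop cs i res = res ++ tigSpec (cs.drop i) := by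
  induction n using Nat.strong_induction_on with
  | _ n ih =>
    intro cs i res hn
    by_cases h : i < cs.length
    · have hdrop : cs.drop i = cs[i] :: cs.drop (i+1) := List.drop_eq_getElem_cons h
      rw [tigLoop, dif_pos h, hdrop]
      cases h2 : cs.drop (i+1) with
      | nil =>
        have hlen : cs.length - (i+1) = 0 := by
          have := congrArg List.length h2; simp at this; omega
        simp only [PySem.Chars.lower, List.map, sw1, Bool.false_eq_true, if_false, tigSpec]
        by_cases ht : PySem.Chars.lowerChar cs[i] = 't' ∨ PySem.Chars.lowerChar cs[i] = 'i'
        · rw [if_pos ht, if_pos ht, ih 0 (by omega) cs (i+1) res (by omega), h2]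
          simp [tigSpec]
        · rw [if_neg ht, if_neg ht, ih 0 (by omega) cs (i+1) (res ++ [cs[i]]) (by omega), h2]
          simp [tigSpec]
      | cons d rest' =>
        have hd2 : cs.drop (i+2) = rest' := by
          have : cs.drop (i+2) = (cs.drop (i+1)).drop 1 := by rw [List.drop_drop]
          rw [this, h2]; rfl
        have hl1 : cs.length - (i+1) < n := by
          have := congrArg List.length h2; simp at this; omega
        have hl2 : cs.length - (i+2) < n := by
          have := congrArg List.length h2; simp at this; omega
        simp only [PySem.Chars.lower, List.map, sw2, Bool.and_eq_true, decide_eq_true_eq,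
          tigSpec]
        by_cases hgg : PySem.Chars.lowerChar cs[i] = 'g' ∧ PySem.Chars.lowerChar d = 'g'
        · rw [if_pos hgg, if_pos (Or.inl hgg), ih _ hl2 cs (i+2) res rfl, hd2]
        · rw [if_neg hgg]
          by_cases her : PySem.Chars.lowerChar cs[i] = 'e' ∧ PySem.Chars.lowerChar d = 'r'
          · rw [if_pos her, if_pos (Or.inr her), ih _ hl2 cs (i+2) res rfl, hd2]
          · rw [if_neg her]
            have hno : ¬((PySem.Chars.lowerChar cs[i] = 'g' ∧ PySem.Chars.lowerChar d = 'g') ∨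
                (PySem.Chars.lowerChar cs[i] = 'e' ∧ PySem.Chars.lowerChar d = 'r')) := by
              rintro (hc | hc); exacts [hgg hc, her hc]
            rw [if_neg hno]
            by_cases ht : PySem.Chars.lowerChar cs[i] = 't' ∨ PySem.Chars.lowerChar cs[i] = 'i'
            · rw [if_pos ht, if_pos ht, ih _ hl1 cs (i+1) res rfl, h2]
            · rw [if_neg ht, if_neg ht, ih _ hl1 cs (i+1) (res ++ [cs[i]]) rfl, h2,
                List.append_assoc]
              rfl
    · rw [tigLoop, dif_neg h, List.drop_eq_nil_of_le (by omega)]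
      simp [tigSpec]

theorem tigFold_eq (n : Nat) : ∀ (cs : List Char), cs.length = n →
    ∀ (out : List Char) (pend : Option Char),
      tigFinish (cs.foldl tigStep (out, pend)) =
        out ++ tigSpec (match pend with | some p => p :: cs | none => cs) := by
  induction n using Nat.strong_induction_on with
  | _ n ih =>
    intro cs hn out pend
    cases cs with
    | nil =>
      cases pend with
      | none => simp [tigFinish, tigSpec]
      | some p =>
        simp only [List.foldl_nil, tigFinish, tigSpec]
        split_ifs <;> simp
    | cons c cs' =>
      cases pend with
      | none =>
        rw [List.foldl_cons]
        exact ih cs'.length (by simp at hn; omega) cs' rfl out (some c)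
      | some p =>
        rw [List.foldl_cons]
        simp only [tigStep, tigSpec]
        by_cases hpair : (PySem.Chars.lowerChar p = 'g' ∧ PySem.Chars.lowerChar c = 'g') ∨
            (PySem.Chars.lowerChar p = 'e' ∧ PySem.Chars.lowerChar c = 'r')
        · rw [if_pos hpair, if_pos hpair,
            ih cs'.length (by simp at hn; omega) cs' rfl out none]
        · rw [if_neg hpair, if_neg hpair]
          by_cases ht : PySem.Chars.lowerChar p = 't' ∨ PySem.Chars.lowerChar p = 'i'
          · rw [if_pos ht, if_pos ht,
              ih cs'.length (by simp at hn; omega) cs' rfl out (some c)]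
          · rw [if_neg ht, if_neg ht,
              ih cs'.length (by simp at hn; omega) cs' rfl (out ++ [p]) (some c),
              List.append_assoc]
            rfl

-- ===== VERDICT (by name: the statement is the Claim_ definition above) =====
theorem tiggerfy_spec : Claim_equal_tiggerfy := by
  intro word _
  unfold Spec_tiggerfy tiggerfy tiggerfy_alt
  rw [tigLoop_eq (word.toList.length) word.toList 0 [] (by simp),
    tigFold_eq (word.toList.length) word.toList rfl [] none]
  simp
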